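-- pv_equiv track=rewrite | github.com/devakar771/Season-of-code | game2048_engine.py | remove0
-- ===== SOURCE A (Python) =====
-- def swap(board,i,j,k,l):
--     board[i][j],board[k][l] = board[k][l],board[i][j]
--     return board
--
-- def remove0(board,size):
--     for i in range(size):
--         zer = 0
--         for j in range(size):
--             if board[i][j] != 0:
--                 board = swap(board,i,j,i,zer)
--                 zer += 1
--     return board
-- ===== SOURCE B (Python) =====
-- def remove0(board, size):
--     for i in range(size):
--         row = board[i]
--         nz = [x for x in row[:size] if x != 0]
--         row[:size] = nz + [0] * (size - len(nz))
--     return board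
-- ===== Notes on version B (the rewrite author's own statement) =====
-- stated objective: simpler
-- what changed: Replaced A's in-place two-pointer swap compaction (with a swap helper and a zer cursor) by a gather-then-pad rewrite of each row: filter the nonzeros of the first `size` cells and slice-assign them back followed by zero padding.
import Mathlib
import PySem

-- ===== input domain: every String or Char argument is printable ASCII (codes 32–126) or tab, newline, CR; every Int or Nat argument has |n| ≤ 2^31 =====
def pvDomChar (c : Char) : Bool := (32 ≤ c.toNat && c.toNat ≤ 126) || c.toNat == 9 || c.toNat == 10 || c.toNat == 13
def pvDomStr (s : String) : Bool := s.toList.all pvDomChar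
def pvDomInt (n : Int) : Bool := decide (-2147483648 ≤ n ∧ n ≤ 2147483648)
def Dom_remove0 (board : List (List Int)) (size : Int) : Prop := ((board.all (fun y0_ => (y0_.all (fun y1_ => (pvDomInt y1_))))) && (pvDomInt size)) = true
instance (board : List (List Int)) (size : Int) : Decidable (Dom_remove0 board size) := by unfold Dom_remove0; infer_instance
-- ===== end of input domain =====

-- B replaces A's in-place two-pointer swap compaction with a per-row gather-then-pad rewrite
-- (filter the nonzeros of the first `size` cells, pad with zeros); objective: simpler.
-- A (and B) mutate `board` in place in Python; the equivalence proved here is about the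
-- return value (in Python both leave the argument equal to the returned board).

-- ===== PORT A =====
-- board[i][j] read; exact for the in-range nonnegative indices that occur under Pre_
-- (out-of-range access is a Python IndexError, excluded by Pre_remove0).
def pvGet2 (bd : List (List Int)) (i j : Int) : Int :=
  (bd.getD i.toNat []).getD j.toNat 0

-- swap(board,i,j,k,l): RHS tuple read first, then the two cells written.
def swapA (bd : List (List Int)) (i j k l : Int) : List (List Int) :=
  let a := pvGet2 bd k l
  let b := pvGet2 bd i j
  let bd1 := bd.modify i.toNat (fun row => row.set j.toNat a)
  bd1.modify k.toNat (fun row => row.set l.toNat b)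

def remove0 (board : List (List Int)) (size : Int) : List (List Int) :=
  (PySem.List.pyRange 0 size 1).foldl
    (fun bd i =>
      ((PySem.List.pyRange 0 size 1).foldl
        (fun (st : List (List Int) × Int) j =>
          if pvGet2 st.1 i j ≠ 0 then (swapA st.1 i j i st.2, st.2 + 1) else st)
        (bd, 0)).1)
    board

-- ===== PORT B =====
-- row[:size] = [x for x in row[:size] if x != 0] + [0]*(size - len(nz))
def compactRow (size : Int) (row : List Int) : List Int :=
  let nz := (row.take size.toNat).filter (fun x => x ≠ 0)
  nz ++ List.replicate (size - (nz.length : Int)).toNat 0 ++ row.drop size.toNat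

def remove0_alt (board : List (List Int)) (size : Int) : List (List Int) :=
  (PySem.List.pyRange 0 size 1).foldl
    (fun bd i => bd.modify i.toNat (compactRow size)) board

-- ===== PRECONDITION & SPEC =====
-- Pre_ excludes exactly the inputs on which A raises IndexError: size exceeding the number
-- of rows, or a row among the first `size` shorter than `size`.
def Pre_remove0 (board : List (List Int)) (size : Int) : Prop :=
  size ≤ (board.length : Int) ∧ ∀ row ∈ board.take size.toNat, size ≤ (row.length : Int)
instance (board : List (List Int)) (size : Int) : Decidable (Pre_remove0 board size) := by unfold Pre_remove0; infer_instance

def pvWitness_remove0 : List (List Int) × Int := ([[0, 2], [4, 0]], 2)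

def Spec_remove0 (board : List (List Int)) (size : Int) (out : List (List Int)) : Prop := out = remove0_alt board size
instance (board : List (List Int)) (size : Int) (out : List (List Int)) : Decidable (Spec_remove0 board size out) := by unfold Spec_remove0; infer_instance

-- ===== CLAIM (what is proved, stated in full; the proofs are below) =====
def Claim_equal_remove0 : Prop := ∀ (board : List (List Int)) (size : Int), Dom_remove0 board size → Pre_remove0 board size → Spec_remove0 board size (remove0 board size)

-- ===== LEMMAS AND PROOFS =====

-- row-level version of A's inner loop step (row i fixed; state = (row, zer))
def rstep (st : List Int × Int) (j : Int) : List Int × Int :=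
  if st.1.getD j.toNat 0 ≠ 0 then
    ((st.1.set j.toNat (st.1.getD st.2.toNat 0)).set st.2.toNat (st.1.getD j.toNat 0), st.2 + 1)
  else st

theorem getD_set_lem {α : Type} (l : List α) (n k : Nat) (a d : α) :
    (l.set n a).getD k d = if n = k ∧ n < l.length then a else l.getD k d := by
  induction l generalizing n k with
  | nil => simp
  | cons x xs ih =>
    cases n with
    | zero => cases k <;> simp [List.getD]
    | succ m =>
      cases k with
      | zero => simp [List.getD]
      | succ k2 =>
        simpa [List.getD, Nat.succ_lt_succ_iff] using ih m k2

theorem modify_getD (l : List (List Int)) (n : Nat) (f : List Int → List Int) :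
    l.modify n f = l.set n (f (l.getD n [])):= by
  rw [List.modify_eq_set]; rfl

-- lifting A's inner fold on the whole board to rstep on row i
theorem lift_inner (i : Int) (n : Nat) (hn : i.toNat = n) (bd : List (List Int))
    (hlt : n < bd.length) :
    ∀ (js : List Int) (r0 : List Int) (z : Int),
    js.foldl (fun (st : List (List Int) × Int) j =>
        if pvGet2 st.1 i j ≠ 0 then (swapA st.1 i j i st.2, st.2 + 1) else st)
      (bd.set n r0, z)
    = ((bd.set n (js.foldl rstep (r0, z)).1), (js.foldl rstep (r0, z)).2) := by
  intro js
  induction js with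
  | nil => intro r0 z; simp
  | cons j js ih =>
    intro r0 z
    have hget : pvGet2 (bd.set n r0) i j = r0.getD j.toNat 0 := by
      simp [pvGet2, hn, hlt]
    have hget2 : pvGet2 (bd.set n r0) i z = r0.getD z.toNat 0 := by
      simp [pvGet2, hn, hlt]
    have hswap : swapA (bd.set n r0) i j i z
        = bd.set n ((r0.set j.toNat (r0.getD z.toNat 0)).set z.toNat (r0.getD j.toNat 0)) := by
      simp only [swapA, hget, hget2, hn, modify_getD]
      rw [getD_set_lem]
      simp [hlt, List.set_set]
    simp only [List.foldl_cons]
    by_cases hc : r0.getD j.toNat 0 ≠ 0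
    all_goals have hc2 := hc; simp only [List.getD] at hc2
    · rw [if_pos (by rw [hget]; exact hc), hswap]
      rw [ih]
      simp [rstep, List.getD, hc2]
    · rw [if_neg (by rw [hget]; exact hc)]
      rw [ih]
      push Not at hc2
      simp [rstep, List.getD, hc2]

theorem getD_append2 (x : Int) (A B C : List Int) :
    (A ++ B ++ x :: C).getD (A.length + B.length) 0 = x := by
  induction A with
  | nil =>
    induction B with
    | nil => rfl
    | cons b B ihB => simpa using ihB
  | cons a A ihA =>
    have h : (a :: A).length + B.length = (A.length + B.length) + 1 := by
      simp; omega
    rw [h]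
    simpa using ihA

theorem set_append2 (x v : Int) (A B C : List Int) :
    (A ++ B ++ x :: C).set (A.length + B.length) v = A ++ B ++ v :: C := by
  induction A with
  | nil =>
    induction B with
    | nil => rfl
    | cons b B ihB => simpa using ihB
  | cons a A ihA =>
    have h : (a :: A).length + B.length = (A.length + B.length) + 1 := by
      simp; omega
    rw [h]
    simpa using ihA

theorem getD_head (x : Int) (A C : List Int) :
    (A ++ x :: C).getD A.length 0 = x := by
  simpa using getD_append2 x A [] C

theorem set_head (x v : Int) (A C : List Int) :
    (A ++ x :: C).set A.length v = A ++ v :: C := by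
  simpa using set_append2 x v A [] C

theorem getD_mid (A C : List Int) (zlen : Nat) (x : Int) :
    (A ++ List.replicate zlen 0 ++ x :: C).getD (A.length + zlen) 0 = x := by
  simpa using getD_append2 x A (List.replicate zlen 0) C

theorem set_mid (A C : List Int) (zlen : Nat) (x v : Int) :
    (A ++ List.replicate zlen 0 ++ x :: C).set (A.length + zlen) v
      = A ++ List.replicate zlen 0 ++ v :: C := by
  simpa using set_append2 x v A (List.replicate zlen 0) C

theorem rep_shift (s : Nat) (C : List Int) :
    List.replicate s (0:Int) ++ (0:Int) :: C = (0:Int) :: (List.replicate s (0:Int) ++ C) := by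
  induction s with
  | zero => rfl
  | succ s ih => simp [List.replicate_succ, ih]

-- invariant of the two-pointer compaction, one row
theorem compact_inv (n : Nat) :
    ∀ (A rest : List Int) (zlen : Nat), n ≤ rest.length →
    ((List.range n).map (fun t => ((A.length + zlen + t : Nat) : Int))).foldl rstep
      (A ++ List.replicate zlen 0 ++ rest, (A.length : Int))
    = (A ++ (rest.take n).filter (fun x => x ≠ 0)
         ++ List.replicate (zlen + (n - ((rest.take n).filter (fun x => x ≠ 0)).length)) 0
         ++ rest.drop n,
       (A.length : Int) + ((rest.take n).filter (fun x => x ≠ 0)).length) := by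
  induction n with
  | zero => intro A rest zlen _; simp
  | succ n ih =>
    intro A rest zlen hlen
    cases rest with
    | nil => simp at hlen
    | cons x rest =>
      have hlen' : n ≤ rest.length := by simp at hlen; omega
      rw [List.range_succ_eq_map, List.map_cons, List.map_map, List.foldl_cons]
      have hjt : (((A.length + zlen + 0 : Nat)) : Int).toNat = A.length + zlen := by omega
      have hzt : ((A.length : Nat) : Int).toNat = A.length := by omega
      have hc := getD_mid A rest zlen x
      by_cases hx : x ≠ 0
      · -- nonzero head: it is swapped to position A.length
        have hstep : rstep (A ++ List.replicate zlen 0 ++ x :: rest, (A.length : Int))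
            ((A.length + zlen + 0 : Nat) : Int)
            = ((A ++ [x]) ++ List.replicate zlen 0 ++ rest, ((A ++ [x]).length : Int)) := by
          simp only [rstep, hjt, hzt, hc, if_pos hx]
          cases zlen with
          | zero =>
            simp only [List.replicate, List.append_nil, Nat.add_zero]
            rw [getD_head, set_head, set_head]
            simp
          | succ s =>
            have e0 : A ++ List.replicate (s+1) (0:Int) ++ x :: rest
                = A ++ (0:Int) :: (List.replicate s 0 ++ x :: rest) := by
              simp [List.replicate_succ]
            rw [show (A ++ List.replicate (s+1) (0:Int) ++ x :: rest).getD A.length 0 = 0 from by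
                  rw [e0, getD_head],
                set_mid]
            have e2 : A ++ List.replicate (s+1) (0:Int) ++ (0:Int) :: rest
                = A ++ (0:Int) :: (List.replicate s 0 ++ (0:Int) :: rest) := by
              simp [List.replicate_succ]
            rw [e2, set_head]
            simp [rep_shift, List.replicate_succ]
        rw [hstep]
        have hmap : (List.range n).map ((fun t => ((A.length + zlen + t : Nat) : Int)) ∘ Nat.succ)
            = (List.range n).map (fun t => (((A ++ [x]).length + zlen + t : Nat) : Int)) := by
          refine List.map_congr_left (fun t _ => ?_)
          simp only [Function.comp]
          exact congrArg (fun m : Nat => (m : Int)) (by simp; omega)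
        rw [hmap, ih (A ++ [x]) rest zlen hlen']
        have hfil : ((x :: rest).take (n+1)).filter (fun y => y ≠ 0)
            = x :: ((rest.take n).filter (fun y => y ≠ 0)) := by
          simp [List.take_succ_cons, hx]
        rw [hfil]
        simp only [Prod.mk.injEq]
        constructor
        · simp
        · simp; omega
      · -- zero head: absorbed into the zero block
        push Not at hx
        subst hx
        have hstep : rstep (A ++ List.replicate zlen 0 ++ (0:Int) :: rest, (A.length : Int))
            ((A.length + zlen + 0 : Nat) : Int)
            = (A ++ List.replicate (zlen+1) 0 ++ rest, (A.length : Int)) := by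
          simp only [rstep, hjt, hc]
          rw [if_neg (by simp)]
          rw [show A ++ List.replicate zlen (0:Int) ++ (0:Int) :: rest
                = A ++ List.replicate (zlen+1) (0:Int) ++ rest from by
              simp [rep_shift, List.replicate_succ]]
        rw [hstep]
        have hmap : (List.range n).map ((fun t => ((A.length + zlen + t : Nat) : Int)) ∘ Nat.succ)
            = (List.range n).map (fun t => ((A.length + (zlen+1) + t : Nat) : Int)) := by
          refine List.map_congr_left (fun t _ => ?_)
          simp only [Function.comp]
          exact congrArg (fun m : Nat => (m : Int)) (by omega)
        rw [hmap, ih A rest (zlen+1) hlen']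
        have hfil : (((0:Int) :: rest).take (n+1)).filter (fun y => y ≠ 0)
            = (rest.take n).filter (fun y => y ≠ 0) := by
          simp [List.take_succ_cons]
        rw [hfil]
        have hle : ((rest.take n).filter (fun y => y ≠ 0)).length ≤ n := by
          calc ((rest.take n).filter (fun y => y ≠ 0)).length
              ≤ (rest.take n).length := List.length_filter_le _ _
            _ ≤ n := by simp
        have hrep : zlen + 1 + (n - ((rest.take n).filter (fun y => y ≠ 0)).length)
            = zlen + (n + 1 - ((rest.take n).filter (fun y => y ≠ 0)).length) := by omega
        rw [hrep]
        simp

theorem row_compact (size : Int) (row : List Int) (h0 : 0 ≤ size)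
    (hlen : size ≤ (row.length : Int)) :
    ((PySem.List.pyRange 0 size 1).foldl rstep (row, 0)).1 = compactRow size row := by
  have hn : size.toNat ≤ row.length := by omega
  have hle : ((row.take size.toNat).filter (fun y => y ≠ 0)).length ≤ size.toNat :=
    le_trans (List.length_filter_le _ _) (by simp)
  have h := compact_inv size.toNat [] row 0 hn
  simp only [List.nil_append, List.replicate_zero, List.length_nil, Nat.zero_add,
    Int.natCast_zero, Nat.add_zero, Nat.zero_add] at h
  rw [PySem.List.pyRange_zero, h]
  simp [compactRow]

theorem length_compactRow (size : Int) (row : List Int) (h0 : 0 ≤ size)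
    (hlen : size ≤ (row.length : Int)) : (compactRow size row).length = row.length := by
  simp [compactRow]
  have hle : (List.filter (fun x => !decide (x = 0)) (List.take size.toNat row)).length ≤ size.toNat :=
    le_trans (List.length_filter_le _ _) (by simp)
  omega

theorem outer_fold (size : Int) (board : List (List Int))
    (hsz : size ≤ (board.length : Int))
    (hrows : ∀ row ∈ board.take size.toNat, size ≤ (row.length : Int)) :
    ∀ (m : Nat) (a : Int), 0 ≤ a → (size - a).toNat = m →
    ∀ bd : List (List Int), bd.length = board.length →
      (∀ k, k < size.toNat → (bd.getD k []).length = (board.getD k []).length) →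
    (PySem.List.pyRange a size 1).foldl
      (fun bd i => ((PySem.List.pyRange 0 size 1).foldl
        (fun (st : List (List Int) × Int) j =>
          if pvGet2 st.1 i j ≠ 0 then (swapA st.1 i j i st.2, st.2 + 1) else st) (bd, 0)).1) bd
    = (PySem.List.pyRange a size 1).foldl (fun bd i => bd.modify i.toNat (compactRow size)) bd := by
  intro m
  induction m with
  | zero =>
    intro a ha hm bd _ _
    rw [PySem.List.pyRange_one_eq_nil (show size ≤ a by omega)]
    rfl
  | succ m ih =>
    intro a ha hm bd hblen hrlen
    have halt : a < size := by omega
    rw [PySem.List.pyRange_one_cons halt]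
    simp only [List.foldl_cons]
    have hnlt : a.toNat < bd.length := by rw [hblen]; omega
    have hnsize : a.toNat < size.toNat := by omega
    have hrowlen : size ≤ (((bd.getD a.toNat []).length : Nat) : Int) := by
      rw [hrlen a.toNat hnsize]
      have hn2 : a.toNat < board.length := by omega
      have h3 : a.toNat < (board.take size.toNat).length := by
        simp [List.length_take]; omega
      have h4 : (board.take size.toNat)[a.toNat]'h3 = board.getD a.toNat [] := by
        rw [List.getElem_take]
        exact (List.getD_eq_getElem board [] hn2).symm
      refine hrows _ ?_
      rw [← h4]
      exact List.getElem_mem h3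
    have hset : bd.set a.toNat (bd.getD a.toNat []) = bd := by
      rw [List.getD_eq_getElem bd [] hnlt]
      exact List.set_getElem_self hnlt
    have hA : ((PySem.List.pyRange 0 size 1).foldl
        (fun (st : List (List Int) × Int) j =>
          if pvGet2 st.1 a j ≠ 0 then (swapA st.1 a j a st.2, st.2 + 1) else st) (bd, 0)).1
        = bd.set a.toNat (compactRow size (bd.getD a.toNat [])) := by
      conv_lhs => rw [← hset]
      rw [lift_inner a a.toNat rfl bd hnlt (PySem.List.pyRange 0 size 1) (bd.getD a.toNat []) 0]
      rw [row_compact size _ (by omega) hrowlen]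
    rw [hA, modify_getD bd a.toNat (compactRow size)]
    refine ih (a+1) (by omega) (by omega) _ ?_ ?_
    · rw [List.length_set, hblen]
    · intro k hk
      rw [getD_set_lem]
      by_cases hkn : a.toNat = k ∧ a.toNat < bd.length
      · rw [if_pos hkn, length_compactRow _ _ (by omega) hrowlen, hkn.1]
        exact hrlen k hk
      · rw [if_neg hkn]
        exact hrlen k hk

-- ===== VERDICT (by name: the statement is the Claim_ definition above) =====
theorem remove0_spec : Claim_equal_remove0 := by
  intro board size _ hpre
  obtain ⟨hsz, hrows⟩ := hpre
  unfold Spec_remove0 remove0 remove0_alt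
  exact outer_fold size board hsz hrows size.toNat 0 le_rfl (by omega) board rfl
    (fun k _ => rfl)
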